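-- pv_equiv track=rewrite | github.com/Simenb123/Utvalg | src/pages/a07/backend/control_actions.py | apply_accounts_to_code
-- ===== SOURCE A (Python) =====
-- from collections.abc import Mapping, MutableMapping, Sequence
--
-- def clean_account_ids(accounts: Sequence[object] | None) -> tuple[str, ...]:
--     cleaned: list[str] = []
--     seen: set[str] = set()
--     for account in accounts or ():
--         account_s = str(account or "").strip()
--         if not account_s or account_s in seen:
--             continue
--         cleaned.append(account_s)
--         seen.add(account_s)
--     return tuple(cleaned)
--
-- def apply_accounts_to_code(
--     mapping: MutableMapping[str, str],
--     accounts: Sequence[object] | None,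
--     code: object,
-- ) -> list[str]:
--     code_s = str(code or "").strip()
--     if not code_s:
--         raise ValueError("Mangler A07-kode for mapping.")
--     assigned: list[str] = []
--     for account in clean_account_ids(accounts):
--         mapping[account] = code_s
--         assigned.append(account)
--     if not assigned:
--         raise ValueError("Mangler konto for mapping.")
--     return assigned
-- ===== SOURCE B (Python) =====
-- def apply_accounts_to_code(mapping, accounts, code):
--     code_s = str(code or "").strip()
--     if not code_s:
--         raise ValueError("Mangler A07-kode for mapping.")
--     pending = [s for s in (str(a or "").strip() for a in (accounts or ())) if s]
--     assigned = []
--     while pending: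
--         head = pending[0]
--         mapping[head] = code_s
--         assigned.append(head)
--         # drop every later duplicate of head instead of keeping a seen-set
--         pending = [s for s in pending[1:] if s != head]
--     if not assigned:
--         raise ValueError("Mangler konto for mapping.")
--     return assigned
-- ===== Notes on version B (the rewrite author's own statement) =====
-- stated objective: alternative
-- what changed: Replaces A's seen-set first-occurrence dedup (build cleaned tuple, then re-traverse assigning) with a head-and-filter nub: one while loop that assigns the head of the pending list and deletes all its later duplicates from the suffix, maintaining no auxiliary set.
import Mathlib
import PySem

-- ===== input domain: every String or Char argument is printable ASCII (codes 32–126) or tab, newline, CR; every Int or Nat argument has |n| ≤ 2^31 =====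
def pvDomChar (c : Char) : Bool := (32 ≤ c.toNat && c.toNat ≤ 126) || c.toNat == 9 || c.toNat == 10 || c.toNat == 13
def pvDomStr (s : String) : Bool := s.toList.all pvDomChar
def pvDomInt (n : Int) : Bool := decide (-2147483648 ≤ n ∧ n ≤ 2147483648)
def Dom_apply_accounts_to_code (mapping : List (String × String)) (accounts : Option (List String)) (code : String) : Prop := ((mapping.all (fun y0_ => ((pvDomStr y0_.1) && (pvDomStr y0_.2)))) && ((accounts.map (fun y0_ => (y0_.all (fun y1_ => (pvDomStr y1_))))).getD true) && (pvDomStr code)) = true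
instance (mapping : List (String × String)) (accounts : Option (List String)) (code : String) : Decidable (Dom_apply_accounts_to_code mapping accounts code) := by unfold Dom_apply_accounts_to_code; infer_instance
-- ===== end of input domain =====

-- B replaces A's seen-set first-occurrence dedup by a head-and-filter nub (assign the head, delete its
-- later duplicates from the pending suffix); equivalence is about the RETURN value — both versions also
-- perform the same mutation of `mapping` in Python (same keys, same value, first-occurrence order).

-- ===== PORT A =====
-- helper clean_account_ids: loop with (cleaned, seen) state
def clean_account_ids (accounts : Option (List String)) : List String :=
  ((accounts.getD []).foldl
    (fun (p : List String × PySem.Set String) account =>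
      let account_s := PySem.Str.strip account
      if account_s = "" ∨ p.2.contains account_s = true then p
      else (p.1 ++ [account_s], PySem.Set.add p.2 account_s))
    ([], PySem.Set.empty)).1

def apply_accounts_to_code (mapping : List (String × String)) (accounts : Option (List String)) (code : String) : List String :=
  let code_s := PySem.Str.strip code
  -- second loop: mapping[account] = code_s ; assigned.append(account)
  ((clean_account_ids accounts).foldl
    (fun (p : PySem.Dict String String × List String) account =>
      (p.1.insert account code_s, p.2 ++ [account]))
    (PySem.Dict.ofList mapping, [])).2

-- ===== PORT B =====
-- B's while loop: take the head of `pending`, append it to `assigned`, and filter it out of the tail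
def nubHeadFilter : List String → List String
  | [] => []
  | h :: t => h :: nubHeadFilter (t.filter (fun s => s ≠ h))
termination_by l => l.length
decreasing_by simpa using (List.length_filter_le _ _).trans (by simp : t.attach.length ≤ t.length)

def apply_accounts_to_code_alt (mapping : List (String × String)) (accounts : Option (List String)) (code : String) : List String :=
  let _code_s := PySem.Str.strip code
  let pending := ((accounts.getD []).map PySem.Str.strip).filter (fun s => s ≠ "")
  nubHeadFilter pending

-- ===== PRECONDITION & SPEC =====
-- Pre_ excludes exactly the inputs where A raises ValueError: blank code after stripping,
-- or no account that is non-blank after stripping (then 'assigned' is empty).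
def Pre_apply_accounts_to_code (mapping : List (String × String)) (accounts : Option (List String)) (code : String) : Prop :=
  PySem.Str.strip code ≠ "" ∧ ∃ a ∈ accounts.getD [], PySem.Str.strip a ≠ ""
instance (mapping : List (String × String)) (accounts : Option (List String)) (code : String) : Decidable (Pre_apply_accounts_to_code mapping accounts code) := by unfold Pre_apply_accounts_to_code; infer_instance

def pvWitness_apply_accounts_to_code : (List (String × String)) × Option (List String) × String :=
  ([("1500", "X")], some [" 1500 ", "", "1500", "3000"], " A07 ")

def Spec_apply_accounts_to_code (mapping : List (String × String)) (accounts : Option (List String)) (code : String) (out : List String) : Prop := out = apply_accounts_to_code_alt mapping accounts code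
instance (mapping : List (String × String)) (accounts : Option (List String)) (code : String) (out : List String) : Decidable (Spec_apply_accounts_to_code mapping accounts code out) := by unfold Spec_apply_accounts_to_code; infer_instance

-- ===== CLAIM (what is proved, stated in full; the proofs are below) =====
def Claim_equal_apply_accounts_to_code : Prop := ∀ (mapping : List (String × String)) (accounts : Option (List String)) (code : String), Dom_apply_accounts_to_code mapping accounts code → Pre_apply_accounts_to_code mapping accounts code → Spec_apply_accounts_to_code mapping accounts code (apply_accounts_to_code mapping accounts code)

-- ===== LEMMAS AND PROOFS =====

-- the second loop of A only appends: its list component is the input list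
theorem assign_fold_snd (l : List String) (c : String) (d : PySem.Dict String String) (acc : List String) :
    (l.foldl (fun (p : PySem.Dict String String × List String) account =>
      (p.1.insert account c, p.2 ++ [account])) (d, acc)).2 = acc ++ l := by
  induction l generalizing d acc with
  | nil => simp
  | cons a t ih => simp [List.foldl_cons, ih]

-- A's clean loop, started at a state whose seen set IS its cleaned list,
-- computes Set.add-folding of the stripped-and-filtered list
theorem clean_fold_eq (l : List String) (c : PySem.Set String) :
    ((l.foldl
      (fun (p : List String × PySem.Set String) account =>
        let account_s := PySem.Str.strip account
        if account_s = "" ∨ p.2.contains account_s = true then p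
        else (p.1 ++ [account_s], PySem.Set.add p.2 account_s))
      (c, c)).1)
    = ((l.map PySem.Str.strip).filter (fun s => s ≠ "")).foldl PySem.Set.add c := by
  induction l generalizing c with
  | nil => simp
  | cons a t ih =>
    simp only [List.foldl_cons, List.map_cons, List.filter_cons]
    have hstep : (if PySem.Str.strip a = "" ∨ c.contains (PySem.Str.strip a) = true
          then ((c, c) : List String × PySem.Set String)
          else (c ++ [PySem.Str.strip a], PySem.Set.add c (PySem.Str.strip a)))
        = (if PySem.Str.strip a = "" then (c, c)
           else (PySem.Set.add c (PySem.Str.strip a), PySem.Set.add c (PySem.Str.strip a))) := by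
      by_cases he : PySem.Str.strip a = "" <;>
        by_cases hc : PySem.Str.strip a ∈ c <;>
        simp [PySem.Set.add, he, hc]
    rw [hstep]
    by_cases he : PySem.Str.strip a = ""
    · simpa [he] using ih c
    · simpa [he] using ih (PySem.Set.add c (PySem.Str.strip a))

theorem nubHeadFilter_nil : nubHeadFilter [] = [] := by unfold nubHeadFilter; rfl

theorem nubHeadFilter_cons (h : String) (t : List String) :
    nubHeadFilter (h :: t) = h :: nubHeadFilter (t.filter (fun s => s ≠ h)) := by
  conv_lhs => unfold nubHeadFilter

-- the seen-set fold equals the head-and-filter nub of the elements not already seen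
theorem foldl_add_eq_nubHeadFilter (t : List String) (s : PySem.Set String) :
    t.foldl PySem.Set.add s = s ++ nubHeadFilter (t.filter (fun x => x ∉ s)) := by
  induction t generalizing s with
  | nil => simp [nubHeadFilter_nil]
  | cons h tl ih =>
    simp only [List.foldl_cons, List.filter_cons]
    by_cases hm : h ∈ s
    · have : PySem.Set.add s h = s := by simp [PySem.Set.add, hm]
      simpa [this, hm] using ih s
    · have hadd : PySem.Set.add s h = s ++ [h] := by simp [PySem.Set.add, hm]
      have hfil : tl.filter (fun x => x ∉ s ++ [h])
          = (tl.filter (fun x => x ∉ s)).filter (fun x => x ≠ h) := by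
        rw [List.filter_filter]
        exact List.filter_congr (fun x _ => by
          by_cases hx : x = h <;> by_cases hs : x ∈ s <;> simp [hx, hs])
      rw [hadd, ih (s ++ [h]), hfil]
      simp [hm, nubHeadFilter_cons]

-- ===== VERDICT (by name: the statement is the Claim_ definition above) =====
theorem apply_accounts_to_code_spec : Claim_equal_apply_accounts_to_code := by
  intro mapping accounts code _ _
  unfold Spec_apply_accounts_to_code apply_accounts_to_code apply_accounts_to_code_alt
  rw [assign_fold_snd]
  unfold clean_account_ids
  rw [show (([], PySem.Set.empty) : List String × PySem.Set String)
        = ((PySem.Set.empty : PySem.Set String), (PySem.Set.empty : PySem.Set String)) from rfl]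
  rw [clean_fold_eq, foldl_add_eq_nubHeadFilter]
  simp [PySem.Set.empty]
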